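-- pv_equiv track=rewrite | github.com/komalranikar/PYTHON- | Assignments/02_max_digit_add.py | add_maxdigit
-- ===== SOURCE A (Python) =====
-- def add_maxdigit(nums):
--   ans = []
--   # write your code here
--   a=max(nums)  #the mximum element of list
--   b=str(a)     #converting it in string
--   maxi=len(b)  #length of the number
--   for i in nums:
--     c=str(i)   #converting each element into string
--     if len(c)==maxi: #checking the length of each string and appending the elements which are of maximum length
--       ans.append(i)
--   return sum(ans)
-- ===== SOURCE B (Python) =====
-- def add_maxdigit(nums):
--     groups = {}
--     best = nums[0]
--     for i in nums:
--         if i > best: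
--             best = i
--         L = len(str(i))
--         groups[L] = groups.get(L, 0) + i
--     return groups[len(str(best))]
-- ===== Notes on version B (the rewrite author's own statement) =====
-- stated objective: alternative
-- what changed: B makes one pass that tabulates a dict of digit-length -> running sum while tracking the maximum, then returns the table entry for the maximum's digit-length, instead of A's compute-max-first then filter-and-append-then-sum two-phase scan.
import Mathlib
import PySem

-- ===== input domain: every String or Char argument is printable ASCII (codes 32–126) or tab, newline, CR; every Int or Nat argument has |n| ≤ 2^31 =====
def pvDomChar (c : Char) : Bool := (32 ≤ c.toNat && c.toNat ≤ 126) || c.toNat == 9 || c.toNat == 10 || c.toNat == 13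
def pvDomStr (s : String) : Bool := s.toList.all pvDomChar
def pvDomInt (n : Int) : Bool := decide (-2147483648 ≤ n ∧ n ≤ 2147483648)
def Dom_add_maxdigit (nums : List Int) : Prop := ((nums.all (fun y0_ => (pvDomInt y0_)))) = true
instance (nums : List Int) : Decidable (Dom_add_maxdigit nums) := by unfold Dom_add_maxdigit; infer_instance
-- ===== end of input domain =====

-- B tabulates sums by digit-length in a dict in one pass (tracking the max), then looks up the max's length; alternative single-pass structure, return-value equivalence only.


-- ===== PORT A =====
def add_maxdigit (nums : List Int) : Int :=
  match PySem.List.max? nums (fun y => y) with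
  | none => 0          -- max([]) raises ValueError; excluded by Pre_
  | some a =>
    let b := PySem.Int.toStr a
    let maxi := PySem.Str.len b
    let ans := nums.foldl (fun ans i =>
      if PySem.Str.len (PySem.Int.toStr i) == maxi then ans ++ [i] else ans) ([] : List Int)
    ans.foldl (· + ·) 0

-- ===== PORT B =====
def add_maxdigit_alt (nums : List Int) : Int :=
  match nums with
  | [] => 0            -- nums[0] raises IndexError; excluded by Pre_
  | n0 :: _ =>
    let st := nums.foldl
      (fun (p : PySem.Dict Int Int × Int) i =>
        let L := PySem.Str.len (PySem.Int.toStr i)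
        (p.1.modify L 0 (· + i), if i > p.2 then i else p.2))
      (PySem.Dict.empty, n0)
    st.1.getD (PySem.Str.len (PySem.Int.toStr st.2)) 0

-- ===== PRECONDITION & SPEC =====
-- Pre_ excludes only the empty list, on which both Pythons raise (ValueError / IndexError).
def Pre_add_maxdigit (nums : List Int) : Prop := nums ≠ []
instance (nums : List Int) : Decidable (Pre_add_maxdigit nums) := by unfold Pre_add_maxdigit; infer_instance
def pvWitness_add_maxdigit : List Int := [3, 17, -5]
def Spec_add_maxdigit (nums : List Int) (out : Int) : Prop := out = add_maxdigit_alt nums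
instance (nums : List Int) (out : Int) : Decidable (Spec_add_maxdigit nums out) := by unfold Spec_add_maxdigit; infer_instance

-- ===== CLAIM (what is proved, stated in full; the proofs are below) =====
def Claim_equal_add_maxdigit : Prop := ∀ (nums : List Int), Dom_add_maxdigit nums → Pre_add_maxdigit nums → Spec_add_maxdigit nums (add_maxdigit nums)

-- ===== LEMMAS AND PROOFS =====

-- B's paired fold splits into the dict fold and the running-max fold.
theorem pv_pair_fold (l : List Int) (d : PySem.Dict Int Int) (b : Int) :
    l.foldl
      (fun (p : PySem.Dict Int Int × Int) i =>
        (p.1.modify (PySem.Str.len (PySem.Int.toStr i)) 0 (· + i),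
         if i > p.2 then i else p.2)) (d, b)
    = (l.foldl (fun d i => d.modify (PySem.Str.len (PySem.Int.toStr i)) 0 (· + i)) d,
       l.foldl (fun b i => if i > b then i else b) b) := by
  induction l generalizing d b with
  | nil => rfl
  | cons x t ih =>
    simp only [List.foldl]
    exact ih _ _

-- the running-max loop is foldl max
theorem pv_run_max (l : List Int) (b : Int) :
    l.foldl (fun b i => if i > b then i else b) b = l.foldl max b := by
  induction l generalizing b with
  | nil => rfl
  | cons x t ih =>
    simp only [List.foldl]
    rw [ih]
    congr 1
    split <;> omega

-- the dict entry at key k is the initial entry plus the sum of elements of length k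
theorem pv_dict_sum (l : List Int) (d : PySem.Dict Int Int) (k : Int) :
    (l.foldl (fun d i => d.modify (PySem.Str.len (PySem.Int.toStr i)) 0 (· + i)) d).getD k 0
    = d.getD k 0 + (l.filter (fun i => PySem.Str.len (PySem.Int.toStr i) == k)).sum := by
  induction l generalizing d with
  | nil => simp
  | cons x t ih =>
    simp only [List.foldl]
    rw [ih, PySem.Dict.getD_modify]
    by_cases h : PySem.Str.len (PySem.Int.toStr x) = k
    · rw [if_pos h.symm, List.filter_cons_of_pos (by simpa using h), List.sum_cons, h]
      ring
    · rw [if_neg (Ne.symm h), List.filter_cons_of_neg (by simpa using h)]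

theorem pv_foldl_sum (l : List Int) (a : Int) : l.foldl (· + ·) a = a + l.sum := by
  induction l generalizing a with
  | nil => simp
  | cons x t ih =>
    simp only [List.foldl]
    rw [ih, List.sum_cons]
    ring

theorem add_maxdigit_spec : Claim_equal_add_maxdigit := by
  intro nums _ hpre
  unfold Spec_add_maxdigit add_maxdigit add_maxdigit_alt
  match nums with
  | [] => exact absurd rfl hpre
  | n0 :: t =>
    rw [PySem.List.max?_id_cons]
    simp only [pv_pair_fold]
    rw [pv_run_max]
    have hmx : List.foldl max n0 (n0 :: t) = List.foldl max n0 t := by simp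
    rw [hmx, pv_dict_sum,
      PySem.List.foldl_append_if_eq_filter
        (fun i => PySem.Str.len (PySem.Int.toStr i) == PySem.Str.len (PySem.Int.toStr (t.foldl max n0))),
      pv_foldl_sum]
    simp
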